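-- pv_equiv track=rewrite | github.com/sepehrmaleki369/ribbs | scripts/AllInOneScript.py | noCropsPerDim
-- ===== SOURCE A (Python) =====
-- import math
--
-- def noCropsPerDim(inSize,cropSize,marginSize,startDim=0):
--   # nCropsPerDim - number of crops per dimension, starting from startDim
--   # cumNCropsPerDim - number of crops for one index step along a dimension
--   #                   starting from startDim-1; i.e. it has one more element
--   #                   than nCropsPerDim, and is misaligned by a difference
--   #                   in index of 1
--   nCropsPerDim=[]
--   cumNCropsPerDim=[1]
--   for dim in reversed(range(startDim,len(inSize))):
--     relDim=dim-startDim
--     nCrops=(inSize[dim]-2*marginSize[relDim])/ \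
--            (cropSize[relDim]-2*marginSize[relDim])
--     if nCrops<=0:
--       nCrops=1
--     nCrops=math.ceil(nCrops)
--     nCropsPerDim.append(nCrops)
--     cumNCropsPerDim.append(nCrops*cumNCropsPerDim[len(inSize)-dim-1])
--   nCropsPerDim.reverse()
--   cumNCropsPerDim.reverse()
--   return nCropsPerDim, cumNCropsPerDim
-- ===== SOURCE B (Python) =====
-- def noCropsPerDim(inSize, cropSize, marginSize, startDim=0):
--     # Crop counts by pure integer ceiling division (no floats, no math.ceil).
--     nCropsPerDim = []
--     for dim in range(startDim, len(inSize)):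
--         rel = dim - startDim
--         num = inSize[dim] - 2 * marginSize[rel]
--         den = cropSize[rel] - 2 * marginSize[rel]
--         nCropsPerDim.append(1 if num * den <= 0 else -((-num) // den))
--     # Cumulative counts: take the total product once, then peel it off by exact
--     # integer division going FORWARD (every count is nonzero), instead of
--     # accumulating suffix products backward; no reversal anywhere.
--     running = 1
--     for n in nCropsPerDim:
--         running *= n
--     cumNCropsPerDim = []
--     for n in nCropsPerDim:
--         cumNCropsPerDim.append(running)
--         running //= n
--     cumNCropsPerDim.append(running)
--     return nCropsPerDim, cumNCropsPerDim
-- ===== Notes on version B (the rewrite author's own statement) =====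
-- stated objective: alternative
-- what changed: replaces A's single fused reversed-index loop (float division + math.ceil, appending to two lists while reading back into the growing cumulative list, then reversing both) by forward-only passes that compute each count with integer ceiling division -(-num//den), take the total product once, and then PEEL it off by exact integer division to produce the cumulative list front-to-back -- division instead of backward suffix multiplication, no reversals
import Mathlib
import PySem

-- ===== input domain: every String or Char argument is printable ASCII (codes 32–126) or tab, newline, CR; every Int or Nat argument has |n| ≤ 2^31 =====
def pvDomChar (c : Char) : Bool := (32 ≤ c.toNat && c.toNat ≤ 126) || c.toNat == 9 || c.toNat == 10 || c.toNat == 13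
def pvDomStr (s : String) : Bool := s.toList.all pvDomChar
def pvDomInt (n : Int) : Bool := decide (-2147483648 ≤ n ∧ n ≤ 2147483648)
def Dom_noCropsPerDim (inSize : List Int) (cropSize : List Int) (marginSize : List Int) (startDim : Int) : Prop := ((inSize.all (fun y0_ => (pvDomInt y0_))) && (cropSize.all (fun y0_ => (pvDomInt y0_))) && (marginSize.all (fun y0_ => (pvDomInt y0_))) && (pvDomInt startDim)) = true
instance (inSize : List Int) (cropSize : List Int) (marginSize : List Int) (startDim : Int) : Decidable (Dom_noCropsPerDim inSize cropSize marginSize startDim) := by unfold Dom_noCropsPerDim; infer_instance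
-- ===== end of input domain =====

-- B replaces A's fused reversed loop (with back-indexing and final reversals) by forward-only
-- passes: integer ceiling division for the counts, then the total product peeled off by exact
-- integer division to yield the cumulative list front-to-back; alternative algorithm, same O(n).


-- ===== PORT A =====
-- `q = a/b; if q <= 0: q = 1; nCrops = math.ceil(q)` — exact model of the Python float steps on Dom:
-- for |a|,|b| ≤ 3·2^31 < 2^52 the correctly rounded double a/b keeps the sign of a/b and its ceiling
-- equals the exact rational ceiling (a rounding error < |a/b|·2^-52 < 1/|b| cannot cross an integer),
-- so the guard fires iff a*b ≤ 0 and otherwise the result is ⌈a/b⌉ = -((-a) // b).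
def pvCropCeil (a b : Int) : Int :=
  if a * b ≤ 0 then 1 else -(PySem.Int.floordiv (-a) b)

-- the per-dimension crop count A computes inline
def pvCropAt (inSize : List Int) (cropSize : List Int) (marginSize : List Int) (startDim : Int) (dim : Int) : Int :=
  let relDim := dim - startDim
  pvCropCeil
    (PySem.List.pyGetD inSize dim 0 - 2 * PySem.List.pyGetD marginSize relDim 0)
    (PySem.List.pyGetD cropSize relDim 0 - 2 * PySem.List.pyGetD marginSize relDim 0)

-- A: one reversed loop appending to both lists, reading back into the growing cumulative list
def noCropsPerDim (inSize : List Int) (cropSize : List Int) (marginSize : List Int) (startDim : Int) : List Int × List Int :=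
  let L : Int := inSize.length
  let st := ((PySem.List.pyRange startDim L 1).reverse).foldl
    (fun (st : List Int × List Int) dim =>
      let nCrops := pvCropAt inSize cropSize marginSize startDim dim
      (st.1 ++ [nCrops], st.2 ++ [nCrops * PySem.List.pyGetD st.2 (L - dim - 1) 0]))
    ([], [1])
  (st.1.reverse, st.2.reverse)

-- ===== PORT B =====
-- B: forward loop of integer-ceiling counts; then total product; then forward division pass
def noCropsPerDim_alt (inSize : List Int) (cropSize : List Int) (marginSize : List Int) (startDim : Int) : List Int × List Int :=
  let L : Int := inSize.length
  let nCropsPerDim := (PySem.List.pyRange startDim L 1).foldl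
    (fun acc dim =>
      let rel := dim - startDim
      let num := PySem.List.pyGetD inSize dim 0 - 2 * PySem.List.pyGetD marginSize rel 0
      let den := PySem.List.pyGetD cropSize rel 0 - 2 * PySem.List.pyGetD marginSize rel 0
      acc ++ [if num * den ≤ 0 then 1 else -(PySem.Int.floordiv (-num) den)]) []
  let total := nCropsPerDim.foldl (fun r n => r * n) 1
  let st := nCropsPerDim.foldl
    (fun (st : List Int × Int) n => (st.1 ++ [st.2], PySem.Int.floordiv st.2 n)) ([], total)
  (nCropsPerDim, st.1 ++ [st.2])

-- ===== PRECONDITION & SPEC =====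
-- Pre_ = exactly the inputs where the Python A returns: all indices used are in range and no
-- denominator cropSize[r] - 2*marginSize[r] is zero (else IndexError / ZeroDivisionError).
def Pre_noCropsPerDim (inSize : List Int) (cropSize : List Int) (marginSize : List Int) (startDim : Int) : Prop :=
  (inSize.length : Int) ≤ startDim ∨
  (-(inSize.length : Int) ≤ startDim ∧
   (inSize.length : Int) - startDim ≤ (cropSize.length : Int) ∧
   (inSize.length : Int) - startDim ≤ (marginSize.length : Int) ∧
   ∀ r ∈ PySem.List.pyRange 0 ((inSize.length : Int) - startDim) 1,
     PySem.List.pyGetD cropSize r 0 ≠ 2 * PySem.List.pyGetD marginSize r 0)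
instance (inSize : List Int) (cropSize : List Int) (marginSize : List Int) (startDim : Int) : Decidable (Pre_noCropsPerDim inSize cropSize marginSize startDim) := by unfold Pre_noCropsPerDim; infer_instance

def pvWitness_noCropsPerDim : List Int × List Int × List Int × Int := ([10, 10], [4, 4], [1, 1], 0)

def Spec_noCropsPerDim (inSize : List Int) (cropSize : List Int) (marginSize : List Int) (startDim : Int) (out : List Int × List Int) : Prop := out = noCropsPerDim_alt inSize cropSize marginSize startDim
instance (inSize : List Int) (cropSize : List Int) (marginSize : List Int) (startDim : Int) (out : List Int × List Int) : Decidable (Spec_noCropsPerDim inSize cropSize marginSize startDim out) := by unfold Spec_noCropsPerDim; infer_instance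

-- ===== CLAIM (what is proved, stated in full; the proofs are below) =====
def Claim_equal_noCropsPerDim : Prop := ∀ (inSize : List Int) (cropSize : List Int) (marginSize : List Int) (startDim : Int), Dom_noCropsPerDim inSize cropSize marginSize startDim → Pre_noCropsPerDim inSize cropSize marginSize startDim → Spec_noCropsPerDim inSize cropSize marginSize startDim (noCropsPerDim inSize cropSize marginSize startDim)

-- ===== LEMMAS AND PROOFS =====

-- suffix products of vs, one element longer: [prod vs, prod (tail vs), …, 1]
def pvSufProd : List Int → List Int
  | [] => [1]
  | v :: t => (v * (pvSufProd t).headI) :: pvSufProd t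

theorem pvSufProd_head (t : List Int) : (pvSufProd t).headI = t.prod := by
  induction t with
  | nil => rfl
  | cons v t ih => simp [pvSufProd, ih]

theorem pvSufProd_cons (v : Int) (t : List Int) :
    pvSufProd (v :: t) = (v * t.prod) :: pvSufProd t := by
  simp [pvSufProd, pvSufProd_head]

theorem pvSufProd_shape (t : List Int) : pvSufProd t = t.prod :: (pvSufProd t).tail := by
  cases t with
  | nil => rfl
  | cons v t => rw [pvSufProd_cons]; simp

theorem pvSufProd_length (t : List Int) : (pvSufProd t).length = t.length + 1 := by
  induction t with
  | nil => rfl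
  | cons v t ih => simp [pvSufProd, ih]

-- characterisation of A's fused loop, by induction downward from L
theorem pvFoldA (f : Int → Int) (L : Int) (j : Int) :
    ((PySem.List.pyRange j L 1).reverse).foldl
      (fun (st : List Int × List Int) dim =>
        (st.1 ++ [f dim], st.2 ++ [f dim * PySem.List.pyGetD st.2 (L - dim - 1) 0]))
      ([], [1])
    = (((PySem.List.pyRange j L 1).map f).reverse,
       (pvSufProd ((PySem.List.pyRange j L 1).map f)).reverse) := by
  by_cases h : L ≤ j
  · rw [PySem.List.pyRange_one_eq_nil h]; rfl
  · push Not at h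
    have hcons := PySem.List.pyRange_one_cons (a := j) (b := L) h
    rw [hcons]
    have ih := pvFoldA f L (j + 1)
    set M := (PySem.List.pyRange (j + 1) L 1).map f with hM
    have hlen : M.length = (L - (j + 1)).toNat := by
      simp [hM, PySem.List.length_pyRange_one]
    simp only [List.reverse_cons, List.foldl_append, List.foldl_cons, List.foldl_nil, ih,
      List.map_cons, pvSufProd_cons]
    have hget : PySem.List.pyGetD ((pvSufProd M).reverse) (L - j - 1) 0 = M.prod := by
      rw [pvSufProd_shape M, List.reverse_cons]
      have hl : ((pvSufProd M).tail.reverse.length : Int) = L - j - 1 := by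
        have h2 := pvSufProd_length M
        have h3 : (pvSufProd M).tail.length = (pvSufProd M).length - 1 := by
          simp
        simp [h3, h2, hlen]; omega
      rw [← hl, PySem.List.pyGetD_natCast]
      simp
    rw [hget]
termination_by (L - j).toNat
decreasing_by omega

-- every crop count is nonzero (guard gives 1; otherwise a ceiling of a positive ratio)
theorem pvCropCeil_ne_zero (a b : Int) : pvCropCeil a b ≠ 0 := by
  unfold pvCropCeil
  split_ifs with h
  · decide
  · push Not at h
    have hb : b ≠ 0 := by rintro rfl; simp at h
    rcases lt_or_gt_of_ne hb with hbneg | hbpos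
    · have ha : a < 0 := by nlinarith
      have : PySem.Int.floordiv (-a) b = PySem.Int.floordiv a (-b) := by
        rw [← PySem.Int.floordiv_neg_neg a (-b)]; ring_nf
      rw [this, PySem.Int.floordiv_eq_ediv_of_pos (by omega)]
      have := Int.ediv_neg_of_neg_of_pos ha (b := -b) (by omega)
      omega
    · have ha : 0 < a := by nlinarith
      rw [PySem.Int.floordiv_eq_ediv_of_pos hbpos]
      have := Int.ediv_neg_of_neg_of_pos (a := -a) (by omega) hbpos
      omega

-- exact cancellation of Python floor division on multiples
theorem pvFloordiv_mul_cancel (c m : Int) (hc : c ≠ 0) :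
    PySem.Int.floordiv (c * m) c = m := by
  have h := PySem.Int.floordiv_mul_add_mod (c * m) c
  have hm : PySem.Int.mod (c * m) c = 0 :=
    (PySem.Int.mod_eq_zero_iff_dvd _ _).mpr (dvd_mul_right c m)
  rw [hm, add_zero] at h
  exact mul_right_cancel₀ hc (by linarith [mul_comm m c])

-- the last entry of the suffix-product list is 1
theorem pvSufProd_dropLast (t : List Int) : (pvSufProd t).dropLast ++ [1] = pvSufProd t := by
  induction t with
  | nil => rfl
  | cons v t ih =>
    rw [pvSufProd_cons, List.dropLast_cons_of_ne_nil (by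
      have := pvSufProd_length t; intro hn; rw [hn] at this; simp at this)]
    simp [ih]

-- characterisation of B's forward division pass: it writes the suffix products front-to-back
theorem pvFoldB (vs : List Int) (acc : List Int) (h : ∀ c ∈ vs, c ≠ 0) :
    vs.foldl (fun (st : List Int × Int) n => (st.1 ++ [st.2], PySem.Int.floordiv st.2 n))
      (acc, vs.prod)
    = (acc ++ (pvSufProd vs).dropLast, 1) := by
  induction vs generalizing acc with
  | nil => simp [pvSufProd]
  | cons v t ih =>
    simp only [List.foldl_cons, List.prod_cons]
    rw [pvFloordiv_mul_cancel v t.prod (h v (by simp))]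
    rw [ih (acc ++ [v * t.prod]) (fun c hc => h c (by simp [hc]))]
    rw [pvSufProd_cons, List.dropLast_cons_of_ne_nil (by
      have := pvSufProd_length t; intro hn; rw [hn] at this; simp at this)]
    simp

-- ===== VERDICT (by name: the statement is the Claim_ definition above) =====
theorem noCropsPerDim_spec : Claim_equal_noCropsPerDim := by
  intro inSize cropSize marginSize startDim _ _
  unfold Spec_noCropsPerDim noCropsPerDim noCropsPerDim_alt
  simp only [pvFoldA, List.reverse_reverse, PySem.List.foldl_append_singleton_eq_map,
    List.nil_append]
  have hbody : (PySem.List.pyRange startDim ((inSize.length : Nat) : Int) 1).map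
      (fun dim =>
        let rel := dim - startDim
        let num := PySem.List.pyGetD inSize dim 0 - 2 * PySem.List.pyGetD marginSize rel 0
        let den := PySem.List.pyGetD cropSize rel 0 - 2 * PySem.List.pyGetD marginSize rel 0
        if num * den ≤ 0 then 1 else -(PySem.Int.floordiv (-num) den))
      = (PySem.List.pyRange startDim ((inSize.length : Nat) : Int) 1).map
          (pvCropAt inSize cropSize marginSize startDim) := by
    exact List.map_congr_left (fun d _ => rfl)
  rw [hbody]
  set M := (PySem.List.pyRange startDim ((inSize.length : Nat) : Int) 1).map
    (pvCropAt inSize cropSize marginSize startDim) with hM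
  have hne : ∀ c ∈ M, c ≠ 0 := by
    intro c hc
    rcases List.mem_map.mp hc with ⟨d, _, rfl⟩
    exact pvCropCeil_ne_zero _ _
  rw [← List.prod_eq_foldl, pvFoldB M [] hne]
  simp [pvSufProd_dropLast]
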